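-- pv_equiv track=rewrite | github.com/TheZenNinja/CYB210 | Chapter8/Part 2/8.12.py | createNeighborDict
-- ===== SOURCE A (Python) =====
-- def removeMatches(text, toRemove):
--     newTxt = ""
--     for l in text:
--         if l not in toRemove:
--             newTxt += l;
--     return newTxt
--
-- def createNeighborDict(text):
--     mainDict = {}
--     text = text.lower()
--     nonLetters = removeMatches(text, "abcdefghijklmnopqrstuvwxyz")
--     letters = removeMatches(text, nonLetters)
--
--     for i in range(1, len(letters)):
--         letterDict = mainDict.setdefault(letters[i], {})
--         maybeAdd(letters[i-1], letterDict)
--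
--         letterDict = mainDict.setdefault(letters[i-1], {})
--         maybeAdd(letters[i], letterDict)
--     return mainDict
--
-- def maybeAdd(ch, toDict):
--     if ch in 'abcdefghijklmnopqrstuvwxyz':
--         toDict[ch] = toDict.setdefault(ch, 0) + 1
-- ===== SOURCE B (Python) =====
-- def createNeighborDict(text):
--     letters = [c for c in text.lower() if 'a' <= c <= 'z']
--     edges = {}
--     for prev, cur in zip(letters, letters[1:]):
--         edges[(cur, prev)] = edges.get((cur, prev), 0) + 1
--         edges[(prev, cur)] = edges.get((prev, cur), 0) + 1
--     result = {}
--     for (a, b), n in edges.items():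
--         result.setdefault(a, {})[b] = n
--     return result
-- ===== Notes on version B (the rewrite author's own statement) =====
-- stated objective: alternative
-- what changed: A makes three string passes (lower, collect non-letters, strip them) and then directly accumulates the nested dict by indexing letters[i]/letters[i-1]; B filters the letters in one comprehension, counts ordered neighbor pairs in a flat edge-counter over zip(letters, letters[1:]), and reshapes that flat table into the nested dict in a separate pass.
import Mathlib
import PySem

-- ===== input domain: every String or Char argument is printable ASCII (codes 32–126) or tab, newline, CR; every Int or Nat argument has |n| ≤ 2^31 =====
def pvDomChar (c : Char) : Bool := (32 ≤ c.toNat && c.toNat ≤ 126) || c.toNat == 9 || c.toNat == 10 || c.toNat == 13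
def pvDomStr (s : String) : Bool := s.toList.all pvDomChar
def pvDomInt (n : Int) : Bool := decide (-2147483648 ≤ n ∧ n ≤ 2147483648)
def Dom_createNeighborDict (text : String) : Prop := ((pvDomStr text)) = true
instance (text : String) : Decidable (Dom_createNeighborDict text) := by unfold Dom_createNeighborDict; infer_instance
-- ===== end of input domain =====

-- B replaces A's three string passes (lower, collect non-letters, strip them) and direct nested
-- accumulation by index with one letter filter, a flat ordered-pair edge counter over
-- zip(letters, letters[1:]), and a separate reshape pass into the nested dict; same return value.

-- ===== PORT A =====
-- the Python string constant 'abcdefghijklmnopqrstuvwxyz' as a char list (membership tests on it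
-- are all single-char, so List.contains is exact for Python's 'ch in <str>')
def pvAlphabet : List Char :=
  ['a','b','c','d','e','f','g','h','i','j','k','l','m','n','o','p','q','r','s','t','u','v','w','x','y','z']

-- removeMatches: builds newTxt by appending each char of text not occurring in toRemove
def removeMatchesA (text toRemove : List Char) : List Char :=
  text.foldl (fun newTxt l => if toRemove.contains l then newTxt else newTxt ++ [l]) []

-- maybeAdd: toDict[ch] = toDict.setdefault(ch, 0) + 1, guarded by ch in the alphabet
def maybeAddA (ch : Char) (d : PySem.Dict Char Int) : PySem.Dict Char Int :=
  if pvAlphabet.contains ch then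
    let d1 := d.setdefault ch 0
    d1.insert ch (d1.getD ch 0 + 1)
  else d

-- one iteration of A's 'for i in range(1, len(letters))' body; the aliased letterDict mutation is
-- modelled by reading the inner dict and writing it back
def stepA (letters : List Char) (m : PySem.Dict Char (PySem.Dict Char Int)) (i : Int) :
    PySem.Dict Char (PySem.Dict Char Int) :=
  let cur := PySem.List.pyGetD letters i ' '
  let prev := PySem.List.pyGetD letters (i - 1) ' '
  let m1 := m.setdefault cur PySem.Dict.empty
  let m1' := m1.insert cur (maybeAddA prev (m1.getD cur PySem.Dict.empty))
  let m2 := m1'.setdefault prev PySem.Dict.empty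
  m2.insert prev (maybeAddA cur (m2.getD prev PySem.Dict.empty))

-- dict-of-dicts to the association-list return type (Char keys back to 1-char strings)
def pvToOut (m : PySem.Dict Char (PySem.Dict Char Int)) : List (String × List (String × Int)) :=
  m.items.map (fun p => (String.ofList [p.1], p.2.items.map (fun q => (String.ofList [q.1], q.2))))

def createNeighborDict (text : String) : List (String × List (String × Int)) :=
  let lowered := PySem.Chars.lower text.toList
  let nonLetters := removeMatchesA lowered pvAlphabet
  let letters := removeMatchesA lowered nonLetters
  pvToOut ((PySem.List.pyRange 1 (PySem.List.len letters) 1).foldl (stepA letters) PySem.Dict.empty)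

-- ===== PORT B =====
-- 'a' <= c <= 'z'
def pvLetterB (c : Char) : Bool := decide ('a' ≤ c) && decide (c ≤ 'z')

-- body of B's zip loop: edges[(cur,prev)] += 1; edges[(prev,cur)] += 1 (pc = (prev, cur))
def edgeStepB (d : PySem.Dict (Char × Char) Int) (pc : Char × Char) : PySem.Dict (Char × Char) Int :=
  let e1 := d.insert (pc.2, pc.1) (d.getD (pc.2, pc.1) 0 + 1)
  e1.insert (pc.1, pc.2) (e1.getD (pc.1, pc.2) 0 + 1)

-- body of B's reshape loop: result.setdefault(a, {})[b] = n  (q = ((a, b), n))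
def reshStepB (r : PySem.Dict Char (PySem.Dict Char Int)) (q : (Char × Char) × Int) :
    PySem.Dict Char (PySem.Dict Char Int) :=
  let r1 := r.setdefault q.1.1 PySem.Dict.empty
  r1.insert q.1.1 ((r1.getD q.1.1 PySem.Dict.empty).insert q.1.2 q.2)

def createNeighborDict_alt (text : String) : List (String × List (String × Int)) :=
  let letters := (PySem.Chars.lower text.toList).filter pvLetterB
  let edges := (letters.zip letters.tail).foldl edgeStepB PySem.Dict.empty
  pvToOut (edges.items.foldl reshStepB PySem.Dict.empty)

-- ===== PRECONDITION & SPEC =====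
def Spec_createNeighborDict (text : String) (out : List (String × List (String × Int))) : Prop := out = createNeighborDict_alt text
instance (text : String) (out : List (String × List (String × Int))) : Decidable (Spec_createNeighborDict text out) := by unfold Spec_createNeighborDict; infer_instance

-- ===== CLAIM (what is proved, stated in full; the proofs are below) =====
def Claim_equal_createNeighborDict : Prop := ∀ (text : String), Dom_createNeighborDict text → Spec_createNeighborDict text (createNeighborDict text)

-- ===== LEMMAS AND PROOFS =====

-- -- proof-side common forms --
-- nested increment: what one maybeAdd-through-setdefault does to the outer dict
def pvIncN (m : PySem.Dict Char (PySem.Dict Char Int)) (a b : Char) :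
    PySem.Dict Char (PySem.Dict Char Int) :=
  m.insert a ((m.getD a PySem.Dict.empty).insert b ((m.getD a PySem.Dict.empty).getD b 0 + 1))

-- nested overwrite: what one reshape step does
def pvSetN (r : PySem.Dict Char (PySem.Dict Char Int)) (a b : Char) (n : Int) :
    PySem.Dict Char (PySem.Dict Char Int) :=
  r.insert a ((r.getD a PySem.Dict.empty).insert b n)

-- flat counter increment
def pvInc1 (d : PySem.Dict (Char × Char) Int) (k : Char × Char) : PySem.Dict (Char × Char) Int :=
  d.insert k (d.getD k 0 + 1)

-- the event stream: each adjacent pair contributes its two directed edges, in A's update order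
def pvEvents (ls : List Char) : List (Char × Char) :=
  (ls.zip ls.tail).flatMap (fun pc => [(pc.2, pc.1), (pc.1, pc.2)])

theorem pv_hle (a b : Char) : (a ≤ b) ↔ a.toNat ≤ b.toNat := Iff.rfl

theorem pv_alpha_contains (c : Char) : pvAlphabet.contains c = pvLetterB c := by
  unfold pvLetterB
  by_cases h : 97 ≤ c.toNat ∧ c.toNat ≤ 122
  · obtain ⟨h1, h2⟩ := h
    have hmem : c ∈ pvAlphabet := by
      have hc : c = Char.ofNat c.toNat := (Char.ofNat_toNat c).symm
      set n := c.toNat with hn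
      interval_cases n <;> rw [hc] <;> decide
    have ha : ('a' ≤ c) := (pv_hle _ _).mpr (by simpa using h1)
    have hz : (c ≤ 'z') := (pv_hle _ _).mpr (by simpa using h2)
    simp [List.contains_eq_mem, hmem, ha, hz]
  · have hmem : c ∉ pvAlphabet := by
      intro hm; apply h; fin_cases hm <;> simp
    have h1 : ¬ ('a' ≤ c) ∨ ¬ (c ≤ 'z') := by
      rw [pv_hle, pv_hle]
      show ¬ (97 ≤ c.toNat) ∨ ¬ (c.toNat ≤ 122)
      omega
    simp only [List.contains_eq_mem, hmem, decide_false]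
    rcases h1 with h1 | h1 <;> simp [h1]

theorem pv_rm_eq_filter (t r : List Char) :
    removeMatchesA t r = t.filter (fun c => !(r.contains c)) := by
  unfold removeMatchesA
  have h : ∀ (acc : List Char), ∀ l ∈ t,
      (if r.contains l then acc else acc ++ [l])
        = (if (!(r.contains l)) = true then acc ++ [l] else acc) := by
    intro acc l _; cases h : r.contains l <;> simp
  rw [PySem.List.foldl_congr_mem _ _ _ _ h, PySem.List.foldl_append_if_eq_filter]
  simp

theorem pv_lettersA (t : List Char) :
    removeMatchesA t (removeMatchesA t pvAlphabet) = t.filter pvLetterB := by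
  rw [pv_rm_eq_filter, pv_rm_eq_filter]
  apply List.filter_congr
  intro c hc
  simp only [List.contains_eq_mem, List.mem_filter]
  by_cases ha : pvAlphabet.contains c
  · simp [List.contains_eq_mem] at ha
    simp [ha, ← pv_alpha_contains, List.contains_eq_mem]
  · simp [List.contains_eq_mem] at ha
    simp [ha, hc, ← pv_alpha_contains, List.contains_eq_mem]

-- setdefault followed by overwrite at the same key is a plain insert
theorem pv_setdefault_insert {κ ν : Type} [BEq κ] [LawfulBEq κ]
    (d : PySem.Dict κ ν) (k : κ) (v0 v : ν) :
    (d.setdefault k v0).insert k v = d.insert k v := by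
  by_cases hc : d.contains k = true
  · rw [PySem.Dict.setdefault_of_contains _ _ hc]
  · rw [PySem.Dict.setdefault_of_not_contains _ _ (by simpa using hc),
        PySem.Dict.insert_insert_self]

-- two inserts at distinct keys commute when the first key is already present
theorem pv_insert_comm {κ ν : Type} [BEq κ] [LawfulBEq κ] [DecidableEq κ]
    (d : PySem.Dict κ ν) (k k' : κ) (v w : ν)
    (hk : d.contains k = true) (hne : k' ≠ k) :
    (d.insert k v).insert k' w = (d.insert k' w).insert k v := by
  apply PySem.Dict.ext
  by_cases hc : d.contains k' = true
  · rw [PySem.Dict.items_insert_of_contains (d.insert k v) w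
          (by rw [PySem.Dict.contains_insert]; simp [hc]),
        PySem.Dict.items_insert_of_contains d v hk,
        PySem.Dict.items_insert_of_contains (d.insert k' w) v
          (by rw [PySem.Dict.contains_insert]; simp [hk]),
        PySem.Dict.items_insert_of_contains d w hc]
    rw [List.map_map, List.map_map]
    apply List.map_congr_left
    intro p _
    by_cases h1 : p.1 = k <;> by_cases h2 : p.1 = k' <;>
      simp [Function.comp, h1, h2, hne, Ne.symm hne]
  · have hc' : d.contains k' = false := by simpa using hc
    rw [PySem.Dict.items_insert_of_not_contains (d.insert k v) w
          (by rw [PySem.Dict.contains_insert]; simp [hc', fun h => hne h]),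
        PySem.Dict.items_insert_of_contains d v hk,
        PySem.Dict.items_insert_of_contains (d.insert k' w) v
          (by rw [PySem.Dict.contains_insert]; simp [hk]),
        PySem.Dict.items_insert_of_not_contains d w hc',
        List.map_append]
    simp
    exact fun h => absurd h hne

theorem pv_stepA_eq (letters : List Char) (m : PySem.Dict Char (PySem.Dict Char Int)) (i : Int)
    (hcur : pvAlphabet.contains (PySem.List.pyGetD letters i ' ') = true)
    (hprev : pvAlphabet.contains (PySem.List.pyGetD letters (i - 1) ' ') = true) :
    stepA letters m i =
      pvIncN (pvIncN m (PySem.List.pyGetD letters i ' ') (PySem.List.pyGetD letters (i - 1) ' '))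
        (PySem.List.pyGetD letters (i - 1) ' ') (PySem.List.pyGetD letters i ' ') := by
  set cur := PySem.List.pyGetD letters i ' ' with hc
  set prev := PySem.List.pyGetD letters (i - 1) ' ' with hp
  unfold stepA maybeAddA pvIncN
  rw [← hc, ← hp]
  simp only [hcur, hprev, if_pos]
  simp only [PySem.Dict.getD_setdefault_self, pv_setdefault_insert]

-- an index loop over i in range(1, len xs) reading xs[i-1], xs[i] is the loop over adjacent pairs
theorem pv_range_eq_zip {α γ : Type} (xs : List α) (d : α) (f : γ → α → α → γ) (init : γ) :
    (List.range (xs.length - 1)).foldl (fun m k => f m (xs.getD k d) (xs.getD (k + 1) d)) init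
      = (xs.zip xs.tail).foldl (fun m pc => f m pc.1 pc.2) init := by
  induction xs generalizing init with
  | nil => simp
  | cons a t ih =>
    cases t with
    | nil => simp
    | cons b t' =>
      simp only [List.length_cons, Nat.add_sub_cancel, List.range_succ_eq_map,
        List.foldl_cons, List.foldl_map, List.zip_cons_cons, List.tail_cons]
      have h1 : ((a :: b :: t').getD 0 d) = a := rfl
      have h2 : ((a :: b :: t').getD 1 d) = b := rfl
      rw [h1, h2]
      have := ih (f init a b)
      simp only [List.length_cons, Nat.add_sub_cancel, List.tail_cons] at this
      rw [← this]
      apply PySem.List.foldl_congr_mem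
      intro acc x _
      simp

-- a pair loop doing two updates per pair is the flat loop over the interleaved event stream
theorem pv_foldl_flat2 {σ : Type} (f : σ → Char × Char → σ) (P : List (Char × Char)) (init : σ) :
    P.foldl (fun s pc => f (f s (pc.2, pc.1)) (pc.1, pc.2)) init
      = (P.flatMap (fun pc => [(pc.2, pc.1), (pc.1, pc.2)])).foldl f init := by
  induction P generalizing init with
  | nil => simp
  | cons q t ih => simp [ih]

-- lookup characterisation of one nested increment
theorem pvIncN_getD_getD (m : PySem.Dict Char (PySem.Dict Char Int)) (x y a b : Char) :
    ((pvIncN m x y).getD a PySem.Dict.empty).getD b 0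
      = ((m.getD a PySem.Dict.empty).getD b 0) + (if a = x ∧ b = y then 1 else 0) := by
  unfold pvIncN
  by_cases ha : a = x
  · subst ha
    rw [PySem.Dict.getD_insert_self]
    by_cases hb : b = y
    · subst hb; rw [PySem.Dict.getD_insert_self]; simp
    · rw [PySem.Dict.getD_insert_of_ne _ _ _ hb]; simp [hb]
  · rw [PySem.Dict.getD_insert_of_ne _ _ _ ha]; simp [ha]

-- lookup characterisation of the nested accumulation
theorem pv_nested_getD (E : List (Char × Char)) (a b : Char) :
    (((E.foldl (fun m k => pvIncN m k.1 k.2) PySem.Dict.empty).getD a PySem.Dict.empty).getD b 0)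
      = (E.count (a, b) : Int) := by
  induction E using List.reverseRecOn with
  | nil => simp [PySem.Dict.getD_empty]
  | append_singleton E k ih =>
    obtain ⟨x, y⟩ := k
    rw [List.foldl_append]
    simp only [List.foldl_cons, List.foldl_nil]
    rw [pvIncN_getD_getD, ih, List.count_append]
    by_cases h : a = x ∧ b = y
    · obtain ⟨ha, hb⟩ := h
      subst ha; subst hb
      simp [List.count_singleton]
    · have : ((a, b) ≠ (x, y)) := by
        intro he
        exact h (by cases he; exact ⟨rfl, rfl⟩)
      simp [h, List.count_singleton]
      intro hx hy
      exact h ⟨hx.symm, hy.symm⟩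

-- a key present in the inner dict of a means a is an outer key
theorem pv_outer_contains (m : PySem.Dict Char (PySem.Dict Char Int)) (a b : Char)
    (h : b ∈ (m.getD a PySem.Dict.empty).keys) : m.contains a = true := by
  by_cases hc : m.contains a = true
  · exact hc
  · rw [PySem.Dict.getD_of_not_contains _ _ (by simpa using hc)] at h
    simp [PySem.Dict.keys_empty] at h

-- reshape commutes with one nested increment past entries whose key differs
theorem pv_resh_push (L : List ((Char × Char) × Int)) (a b : Char) :
    ∀ (m : PySem.Dict Char (PySem.Dict Char Int)),
      (∀ q ∈ L, q.1 ≠ (a, b)) → b ∈ (m.getD a PySem.Dict.empty).keys →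
      L.foldl (fun r q => pvSetN r q.1.1 q.1.2 q.2) (pvIncN m a b)
        = pvIncN (L.foldl (fun r q => pvSetN r q.1.1 q.1.2 q.2) m) a b := by
  induction L with
  | nil => intro m _ _; simp
  | cons q L ih =>
    intro m hL hb
    obtain ⟨⟨x, y⟩, w⟩ := q
    have hq : (x, y) ≠ (a, b) := hL _ (List.mem_cons_self ..)
    simp only [List.foldl_cons]
    have hcomm : pvSetN (pvIncN m a b) x y w = pvIncN (pvSetN m x y w) a b := by
      by_cases hx : x = a
      · subst hx
        have hy : y ≠ b := by intro h; subst h; exact hq rfl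
        -- same outer key, distinct inner keys
        unfold pvIncN pvSetN
        rw [PySem.Dict.getD_insert_self, PySem.Dict.getD_insert_self,
            PySem.Dict.insert_insert_self, PySem.Dict.insert_insert_self,
            PySem.Dict.getD_insert_of_ne _ _ _ (Ne.symm hy)]
        congr 1
        exact pv_insert_comm _ _ _ _ _
          ((PySem.Dict.contains_iff_mem_keys _ _).mpr hb) hy
      · -- distinct outer keys
        have hax : a ≠ x := fun h => hx h.symm
        unfold pvIncN pvSetN
        rw [PySem.Dict.getD_insert_of_ne _ _ _ hx,
            PySem.Dict.getD_insert_of_ne _ _ _ hax]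
        exact pv_insert_comm _ _ _ _ _ (pv_outer_contains m a b hb) hx
    rw [hcomm]
    apply ih
    · exact fun q hq' => hL q (List.mem_cons_of_mem _ hq')
    · -- b is still an inner key of a after the step at x
      by_cases hx : x = a
      · subst hx
        unfold pvSetN
        rw [PySem.Dict.getD_insert_self]
        rw [PySem.Dict.mem_keys_insert]
        right; exact hb
      · unfold pvSetN
        rw [PySem.Dict.getD_insert_of_ne _ _ _ (fun h => absurd h.symm hx)]
        exact hb

-- bumping one key's count before reshaping = reshaping then one nested increment
theorem pv_resh_bump (S : List (Char × Char)) (hS : S.Nodup) (k : Char × Char) (hk : k ∈ S)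
    (g : Char × Char → Int) :
    ∀ (r : PySem.Dict Char (PySem.Dict Char Int)),
      (S.map (fun k' => (k', g k' + if k' = k then 1 else 0))).foldl
          (fun r q => pvSetN r q.1.1 q.1.2 q.2) r
        = pvIncN ((S.map (fun k' => (k', g k'))).foldl (fun r q => pvSetN r q.1.1 q.1.2 q.2) r)
            k.1 k.2 := by
  induction S with
  | nil => cases hk
  | cons k' S ih =>
    intro r
    simp only [List.map_cons, List.foldl_cons]
    by_cases he : k' = k
    · subst he
      have hnot : k' ∉ S := (List.nodup_cons.mp hS).1
      -- the tail only has keys ≠ k'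
      have hmapeq : S.map (fun x => (x, g x + if x = k' then 1 else 0))
          = S.map (fun x => (x, g x)) := by
        apply List.map_congr_left
        intro x hx
        have : x ≠ k' := fun h => hnot (h ▸ hx)
        simp [this]
      rw [hmapeq]
      simp only [if_true]
      -- incN of the start state with (a,b) bound to g k' is the bumped start state
      have hstart : pvSetN r k'.1 k'.2 (g k' + 1) = pvIncN (pvSetN r k'.1 k'.2 (g k')) k'.1 k'.2 := by
        unfold pvIncN pvSetN
        rw [PySem.Dict.getD_insert_self, PySem.Dict.getD_insert_self,
            PySem.Dict.insert_insert_self, PySem.Dict.insert_insert_self]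
      rw [hstart]
      apply pv_resh_push
      · intro q hq
        simp only [List.mem_map] at hq
        obtain ⟨x, hx, rfl⟩ := hq
        have : x ≠ k' := fun h => hnot (h ▸ hx)
        simpa using this
      · unfold pvSetN
        rw [PySem.Dict.getD_insert_self, PySem.Dict.mem_keys_insert]
        left; rfl
    · have hk' : k ∈ S := by
        rcases List.mem_cons.mp hk with h | h
        · exact absurd h.symm he
        · exact h
      simp only [if_neg he, add_zero]
      exact ih (List.nodup_cons.mp hS).2 hk' _

-- reshaping the count table of the event stream is the direct nested accumulation
theorem pv_main (E : List (Char × Char)) :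
    ((PySem.Set.ofList E).map (fun k => (k, (E.count k : Int)))).foldl
        (fun r q => pvSetN r q.1.1 q.1.2 q.2) PySem.Dict.empty
      = E.foldl (fun m k => pvIncN m k.1 k.2) PySem.Dict.empty := by
  induction E using List.reverseRecOn with
  | nil => simp [PySem.Set.ofList]
  | append_singleton E k ih =>
    rw [PySem.Set.ofList_append_singleton, PySem.Set.add_eq_ite, List.foldl_append]
    simp only [List.foldl_cons, List.foldl_nil]
    by_cases hm : k ∈ PySem.Set.ofList E
    · rw [if_pos hm]
      have hmap : (PySem.Set.ofList E).map (fun k' => (k', ((E ++ [k]).count k' : Int)))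
          = (PySem.Set.ofList E).map
              (fun k' => (k', (E.count k' : Int) + if k' = k then 1 else 0)) := by
        apply List.map_congr_left
        intro x _
        have : (E ++ [k]).count x = E.count x + if x = k then 1 else 0 := by
          rw [List.count_append]
          by_cases hx : x = k
          · simp [hx, List.count_singleton]
          · simp [hx, List.count_singleton]
            exact fun h => hx h.symm
        rw [this]
        by_cases hx : x = k <;> simp [hx]
      rw [hmap, pv_resh_bump _ (PySem.Set.nodup_ofList E) k hm _ _, ih]
    · rw [if_neg hm]
      have hknE : k ∉ E := fun h => hm ((PySem.Set.mem_ofList _ _).mpr h)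
      rw [List.map_append]
      have hmap : (PySem.Set.ofList E).map (fun k' => (k', ((E ++ [k]).count k' : Int)))
          = (PySem.Set.ofList E).map (fun k' => (k', (E.count k' : Int))) := by
        apply List.map_congr_left
        intro x hx
        have hxk : x ≠ k := fun h => hknE (h ▸ (PySem.Set.mem_ofList _ _).mp hx)
        rw [List.count_append]
        simp [List.count_singleton]
        exact fun h => hxk h.symm
      rw [hmap, List.foldl_append, ih]
      simp only [List.map_cons, List.map_nil, List.foldl_cons, List.foldl_nil]
      have hcnt : (E ++ [k]).count k = 1 := by
        rw [List.count_append, List.count_eq_zero.mpr hknE]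
        simp [List.count_singleton]
      rw [hcnt]
      have hIncSet : ∀ (M : PySem.Dict Char (PySem.Dict Char Int)),
          pvIncN M k.1 k.2 = pvSetN M k.1 k.2 ((M.getD k.1 PySem.Dict.empty).getD k.2 0 + 1) :=
        fun M => rfl
      rw [hIncSet, pv_nested_getD E k.1 k.2,
          List.count_eq_zero.mpr (by simpa using hknE)]
      norm_num

-- A's index loop over the letters equals the nested accumulation over the event stream
theorem pv_pyrange_fold {γ : Type} (n : Nat) (F : γ → Int → γ) (init : γ) :
    (PySem.List.pyRange 1 (n : Int) 1).foldl F init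
      = (List.range (n - 1)).foldl (fun m (k : Nat) => F m (1 + (k : Int))) init := by
  rw [PySem.List.pyRange_one, List.foldl_map]
  have h : ((n : Int) - 1).toNat = n - 1 := by omega
  rw [h]

theorem pv_A_fold (ls : List Char) (h : ∀ c ∈ ls, pvAlphabet.contains c = true) :
    (PySem.List.pyRange 1 (PySem.List.len ls) 1).foldl (stepA ls) PySem.Dict.empty
      = (pvEvents ls).foldl (fun m k => pvIncN m k.1 k.2) PySem.Dict.empty := by
  rw [PySem.List.len_eq, pv_pyrange_fold ls.length (stepA ls) PySem.Dict.empty]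
  refine Eq.trans (PySem.List.foldl_congr_mem _ _
      (fun m k => pvIncN (pvIncN m (ls.getD (k + 1) ' ') (ls.getD k ' '))
        (ls.getD k ' ') (ls.getD (k + 1) ' ')) _ ?_) ?_
  · intro acc k hkmem
    have hk : k < ls.length - 1 := List.mem_range.mp hkmem
    have hi1 : (1 + (k : Int)) = ((k + 1 : Nat) : Int) := by push_cast; ring
    have hi0 : (1 + (k : Int)) - 1 = ((k : Nat) : Int) := by ring
    have hg1 : PySem.List.pyGetD ls (1 + (k : Int)) ' ' = ls.getD (k + 1) ' ' := by
      rw [hi1, PySem.List.pyGetD_natCast]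
    have hg0 : PySem.List.pyGetD ls ((1 + (k : Int)) - 1) ' ' = ls.getD k ' ' := by
      rw [hi0, PySem.List.pyGetD_natCast]
    have hmem1 : ls.getD (k + 1) ' ' ∈ ls := by
      rw [List.getD_eq_getElem ls ' ' (by omega)]
      exact List.getElem_mem _
    have hmem0 : ls.getD k ' ' ∈ ls := by
      rw [List.getD_eq_getElem ls ' ' (by omega)]
      exact List.getElem_mem _
    rw [pv_stepA_eq ls acc (1 + (k : Int)) (by rw [hg1]; exact h _ hmem1)
          (by rw [hg0]; exact h _ hmem0), hg1, hg0]
  · rw [pv_range_eq_zip ls ' '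
        (fun m p c => pvIncN (pvIncN m c p) p c) PySem.Dict.empty]
    show (ls.zip ls.tail).foldl
        (fun m pc => (fun s k => pvIncN s k.1 k.2)
          ((fun s k => pvIncN s k.1 k.2) m (pc.2, pc.1)) (pc.1, pc.2)) PySem.Dict.empty = _
    rw [pv_foldl_flat2 (fun s k => pvIncN s k.1 k.2)]
    rfl

-- one reshape step with its setdefault resolved
theorem pv_reshStep_eq (r : PySem.Dict Char (PySem.Dict Char Int)) (q : (Char × Char) × Int) :
    reshStepB r q = pvSetN r q.1.1 q.1.2 q.2 := by
  show (r.setdefault q.1.1 PySem.Dict.empty).insert q.1.1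
      (((r.setdefault q.1.1 PySem.Dict.empty).getD q.1.1 PySem.Dict.empty).insert q.1.2 q.2)
      = pvSetN r q.1.1 q.1.2 q.2
  unfold pvSetN
  rw [PySem.Dict.getD_setdefault_self, pv_setdefault_insert]

-- B's two loops equal the nested accumulation over the event stream
theorem pv_B_fold (ls : List Char) :
    (((ls.zip ls.tail).foldl edgeStepB PySem.Dict.empty).items).foldl reshStepB PySem.Dict.empty
      = (pvEvents ls).foldl (fun m k => pvIncN m k.1 k.2) PySem.Dict.empty := by
  have hedges : (ls.zip ls.tail).foldl edgeStepB PySem.Dict.empty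
      = PySem.Dict.counter (pvEvents ls) := by
    show (ls.zip ls.tail).foldl
        (fun s pc => pvInc1 (pvInc1 s (pc.2, pc.1)) (pc.1, pc.2)) PySem.Dict.empty = _
    rw [pv_foldl_flat2 pvInc1]
    exact PySem.Dict.foldl_insert_getD_add_one_eq_counter (pvEvents ls)
  rw [hedges, PySem.Dict.items_counter]
  rw [PySem.List.foldl_congr_mem _ _ (fun r q => pvSetN r q.1.1 q.1.2 q.2) _
        (fun acc q _ => pv_reshStep_eq acc q)]
  exact pv_main (pvEvents ls)

-- ===== VERDICT (by name: the statement is the Claim_ definition above) =====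
theorem createNeighborDict_spec : Claim_equal_createNeighborDict := by
  intro text _
  unfold Spec_createNeighborDict
  simp only [createNeighborDict, createNeighborDict_alt]
  rw [pv_lettersA]
  set ls := (PySem.Chars.lower text.toList).filter pvLetterB with hls
  have h : ∀ c ∈ ls, pvAlphabet.contains c = true := by
    intro c hc
    rw [pv_alpha_contains]
    exact (List.mem_filter.mp hc).2
  rw [pv_A_fold ls h, ← pv_B_fold ls]
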